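-- pv_equiv track=rewrite | github.com/dscottboggs/practice | HackerRank/codetest/cutthesticks.py | cutSticks
-- ===== SOURCE A (Python) =====
-- def get_shortest(sticks):
--     shortest = 10**3+1
--     for stick in sticks:
--         if stick < shortest:
--             shortest = stick
--     return shortest
--
-- delete_of_length = lambda length, sticks: [stick for stick in sticks if stick != length]
--
-- sub_from_all = lambda val, sticks: [stick - val for stick in sticks]
--
-- def cutSticks(sticks):
--     out = []
--     while sticks:
--         out.append(len(sticks))
--         shortest = get_shortest(sticks)
--         sticks = delete_of_length(shortest, sticks)
--         sticks = sub_from_all(shortest, sticks)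
--     return out
-- ===== SOURCE B (Python) =====
-- def cutSticks(sticks):
--     vals = sorted(sticks)
--     n = len(vals)
--     out = []
--     i = 0
--     while i < n:
--         out.append(n - i)
--         j = i
--         while j < n and vals[j] == vals[i]:
--             j += 1
--         i = j
--     return out
-- ===== Notes on version B (the rewrite author's own statement) =====
-- stated objective: faster
-- what changed: B sorts once and emits, for each distinct value, the length of the remaining sorted suffix (skipping duplicate runs with a second pointer), instead of A's per-round min-scan, filter and rebuild of the whole list.
-- intended difference: On lists whose minimum, or some gap between consecutive distinct values, exceeds 1001, A's min-scan starts from the sentinel 10**3+1 and so runs extra rounds that cut 1001 off every stick without deleting any, returning duplicated counts (e.g. [1002] -> [1, 1]); B returns one count per cut round that actually removes sticks ([1002] -> [1]), the intended 'counts of remaining sticks per cut round'. — e.g. on cutSticks([1002]): A returns [1, 1], B returns [1]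
import Mathlib
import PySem

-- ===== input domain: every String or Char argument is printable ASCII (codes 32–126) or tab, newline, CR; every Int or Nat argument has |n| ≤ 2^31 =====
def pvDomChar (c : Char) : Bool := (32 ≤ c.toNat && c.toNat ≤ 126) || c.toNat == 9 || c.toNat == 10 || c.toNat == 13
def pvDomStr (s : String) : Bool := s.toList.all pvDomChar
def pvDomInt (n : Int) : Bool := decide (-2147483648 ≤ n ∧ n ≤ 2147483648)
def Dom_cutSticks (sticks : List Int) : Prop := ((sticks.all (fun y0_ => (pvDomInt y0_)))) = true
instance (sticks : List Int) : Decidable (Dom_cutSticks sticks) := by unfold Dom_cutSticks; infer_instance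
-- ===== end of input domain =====

-- B sorts once and emits, per distinct value, the length of the remaining sorted
-- suffix, instead of A's per-round min-scan / filter / rebuild (objective: faster);
-- on inputs where A's 1001-sentinel min-scan yields phantom rounds, B differs (D_ below).

-- ===== PORT A =====
def getShortest (sticks : List Int) : Int :=
  sticks.foldl (fun shortest stick => if stick < shortest then stick else shortest) 1001

-- cited by cutSticks's decreasing_by: getShortest is a running min capped at 1001
theorem getShortest_eq (l : List Int) : getShortest l = l.foldl min 1001 := by
  unfold getShortest
  congr 1
  funext a b
  rw [min_def]
  split_ifs <;> omega

-- cited by cutSticks's decreasing_by: in a round where every stick exceeds 1001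
-- nothing is deleted but the toNat sum strictly drops
theorem pvSumLt : ∀ (l : List Int), l ≠ [] → (∀ x ∈ l, (1001:Int) < x) →
    ((l.map (fun s => s - 1001)).map Int.toNat).sum < (l.map Int.toNat).sum := by
  intro l
  induction l with
  | nil => intro h; exact absurd rfl h
  | cons x t ih =>
    intro _ hall
    rcases eq_or_ne t [] with rfl | ht
    · simp only [List.map_cons, List.map_nil, List.sum_cons, List.sum_nil]
      have := hall x (by simp)
      omega
    · have h1 : (x - 1001).toNat < x.toNat := by have := hall x (by simp); omega
      have h2 := ih ht (fun y hy => hall y (by simp [hy]))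
      simp only [List.map_cons, List.sum_cons]
      omega

def deleteOfLength (length : Int) (sticks : List Int) : List Int :=
  sticks.filter (fun stick => stick ≠ length)

def subFromAll (val : Int) (sticks : List Int) : List Int :=
  sticks.map (fun stick => stick - val)

def cutSticks (sticks : List Int) : List Int :=
  if h : sticks = [] then []
  else
    (sticks.length : Int) ::
      cutSticks (subFromAll (getShortest sticks) (deleteOfLength (getShortest sticks) sticks))
termination_by (sticks.length, (sticks.map Int.toNat).sum)
decreasing_by
  simp only [subFromAll, deleteOfLength, List.length_map]
  by_cases hmem : getShortest sticks ∈ sticks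
  · apply Prod.Lex.left
    exact (List.length_filter_lt_length_iff_exists).mpr ⟨_, hmem, by simp⟩
  · have h1 : getShortest sticks = 1001 := by
      rcases (getShortest_eq sticks) ▸ PySem.List.foldl_min_mem sticks 1001 with h' | h'
      · exact h'
      · exact absurd h' hmem
    have h2 : ∀ x ∈ sticks, (1001:Int) < x := by
      intro x hx
      have hle := (PySem.List.foldl_min_le sticks 1001).2 x hx
      rw [← getShortest_eq, h1] at hle
      by_cases he : x = 1001
      · exact absurd (by rw [h1]; exact he ▸ hx) hmem
      · omega
    have hfe : sticks.filter (fun stick => stick ≠ getShortest sticks) = sticks := by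
      rw [h1]
      refine List.filter_eq_self.mpr ?_
      intro a ha
      have := h2 a ha
      simp only [ne_eq, decide_eq_true_eq]
      omega
    rw [hfe, h1]
    exact Prod.Lex.right _ (pvSumLt sticks h h2)

-- ===== PORT B =====
-- Source B's outer while over the sorted list, as the structural recursion on the
-- current suffix: emit the suffix length, then the inner while (j advancing past
-- the duplicates of vals[i]) is the dropWhile
def bAltLoop : List Int → List Int
  | [] => []
  | v :: rest => ((rest.length : Int) + 1) :: bAltLoop (rest.dropWhile (fun x => x == v))
termination_by l => l.length
decreasing_by
  simp only [List.length_cons]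
  exact Nat.lt_succ_of_le (List.length_dropWhile_le _ _)

def cutSticks_alt (sticks : List Int) : List Int :=
  bAltLoop (PySem.List.sorted sticks (fun x => x) false)

-- ===== PRECONDITION & SPEC =====
-- On lists whose minimum, or some gap between consecutive distinct values, exceeds 1001,
-- A's min-scan starts from the sentinel 10**3+1 and runs extra rounds that cut 1001 off
-- every stick without deleting any, returning duplicated counts (e.g. [1002] -> [1, 1]);
-- B returns one count per round that actually removes sticks ([1002] -> [1]), the
-- intended 'counts of remaining sticks per cut round'.
def D_cutSticks (sticks : List Int) : Prop :=
  (sticks ≠ [] ∧ ∀ y ∈ sticks, 1001 < y) ∨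
  (∃ x ∈ sticks, (∃ y ∈ sticks, x < y) ∧ ∀ y ∈ sticks, x < y → x + 1001 < y)
instance (sticks : List Int) : Decidable (D_cutSticks sticks) := by unfold D_cutSticks; infer_instance

def Spec_cutSticks (sticks : List Int) (out : List Int) : Prop := ¬ D_cutSticks sticks → out = cutSticks_alt sticks
instance (sticks : List Int) (out : List Int) : Decidable (Spec_cutSticks sticks out) := by unfold Spec_cutSticks; infer_instance

def pvDiffWitness_cutSticks : List Int := [1002]
def pvDiffWitnessOut_cutSticks : (List Int) × (List Int) := ([1, 1], [1])

-- ===== CLAIM (what is proved, stated in full; the proofs are below) =====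
def Claim_unchanged_cutSticks : Prop := ∀ (sticks : List Int), Dom_cutSticks sticks → Spec_cutSticks sticks (cutSticks sticks)
def Claim_changed_cutSticks : Prop := Dom_cutSticks (pvDiffWitness_cutSticks) ∧ D_cutSticks (pvDiffWitness_cutSticks) ∧ cutSticks (pvDiffWitness_cutSticks) = pvDiffWitnessOut_cutSticks.1 ∧ cutSticks_alt (pvDiffWitness_cutSticks) = pvDiffWitnessOut_cutSticks.2 ∧ pvDiffWitnessOut_cutSticks.1 ≠ pvDiffWitnessOut_cutSticks.2
def Claim_exact_cutSticks : Prop := ∀ (sticks : List Int), Dom_cutSticks sticks → D_cutSticks sticks → cutSticks sticks ≠ cutSticks_alt sticks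

-- ===== LEMMAS AND PROOFS =====

-- proof-only characterisation of A's loop on the sorted list: per distinct value v,
-- k capped (no-delete) rounds then the deleting round, cut = amount already cut
def altLoop : List Int → Int → List Int
  | [], _ => []
  | v :: rest, cut =>
    let cnt : Int := (rest.length : Int) + 1
    let k : Int := max 0 (PySem.Int.floordiv (v - cut - 1) 1001)
    List.replicate k.toNat cnt ++ cnt :: altLoop (rest.dropWhile (fun x => x == v)) v
termination_by l _ => l.length
decreasing_by
  simp only [List.length_cons]
  exact Nat.lt_succ_of_le (List.length_dropWhile_le _ _)

theorem pvFoldlMinOfLe : ∀ (l : List Int) (a : Int), (∀ x ∈ l, a ≤ x) → l.foldl min a = a := by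
  intro l
  induction l with
  | nil => intro a _; rfl
  | cons x t ih =>
    intro a h
    simp only [List.foldl_cons]
    rw [min_eq_left (h x (by simp))]
    exact ih a (fun y hy => h y (by simp [hy]))

-- the running min of A over the shifted sorted list is min(cap, head - cut)
theorem pvGetShortestSorted (v c : Int) (rest : List Int) (hall : ∀ x ∈ rest, v ≤ x) :
    getShortest ((v :: rest).map (fun x => x - c)) = min 1001 (v - c) := by
  rw [getShortest_eq]
  simp only [List.map_cons, List.foldl_cons]
  refine pvFoldlMinOfLe _ _ ?_
  intro x hx
  simp only [List.mem_map] at hx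
  obtain ⟨y, hy, rfl⟩ := hx
  have := hall y hy
  have h1 : min 1001 (v - c) ≤ v - c := min_le_right _ _
  omega

-- on a sorted tail all copies of the minimum form a prefix
theorem pvFilterNeEqDropWhile (v : Int) : ∀ (rest : List Int), rest.Pairwise (· ≤ ·) →
    (∀ x ∈ rest, v ≤ x) →
    rest.filter (fun x => x ≠ v) = rest.dropWhile (fun x => x == v) := by
  intro rest
  induction rest with
  | nil => simp
  | cons x t ih =>
    intro hp hall
    by_cases he : x = v
    · subst he
      simp only [List.filter_cons, ne_eq, not_true_eq_false, decide_false, List.dropWhile_cons,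
        BEq.rfl, if_true]
      exact ih (List.Pairwise.of_cons hp) (fun y hy => hall y (by simp [hy]))
    · have hvx : v < x := lt_of_le_of_ne (hall x (by simp)) (Ne.symm he)
      rw [List.dropWhile_cons]
      simp only [show (x == v) = false by simp [he]]
      rw [List.filter_cons]
      simp only [ne_eq, he, not_false_eq_true, decide_true, if_true]
      congr 1
      refine List.filter_eq_self.mpr ?_
      intro a ha
      have hxa : x ≤ a := (List.pairwise_cons.mp hp).1 a ha
      simp only [ne_eq, decide_eq_true_eq]
      omega

-- main invariant: if l is a permutation of the sorted list s shifted down by the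
-- cumulative cut c, then A's loop on l produces the altLoop walk over s from cut c
theorem pvMain : ∀ (n m : Nat) (s l : List Int) (c : Int),
    s.length ≤ n →
    (match s with | [] => (0:Nat) | v :: _ => (v - c).toNat) ≤ m →
    s.Pairwise (· ≤ ·) →
    l.Perm (s.map (fun x => x - c)) →
    cutSticks l = altLoop s c := by
  intro n
  induction n with
  | zero =>
    intro m s l c hn _ _ hperm
    have hs : s = [] := List.length_eq_zero_iff.mp (Nat.le_zero.mp hn)
    subst hs
    have hl : l = [] := hperm.eq_nil
    subst hl
    rw [cutSticks]
    simp [altLoop]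
  | succ n ihn =>
    intro m
    induction m using Nat.strong_induction_on with
    | _ m ihm =>
      intro s l c hn hm hsort hperm
      cases s with
      | nil =>
        have hl : l = [] := hperm.eq_nil
        subst hl
        rw [cutSticks]
        simp [altLoop]
      | cons v rest =>
        have hlen : l.length = rest.length + 1 := by
          have := hperm.length_eq; simpa using this
        have hl : l ≠ [] := by
          intro h; rw [h] at hlen; simp at hlen
        have hall : ∀ x ∈ rest, v ≤ x := fun x hx => (List.pairwise_cons.mp hsort).1 x hx
        have hsh : getShortest l = min 1001 (v - c) := by
          calc getShortest l = l.foldl min 1001 := getShortest_eq l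
            _ = ((v :: rest).map (fun x => x - c)).foldl min 1001 :=
                @List.Perm.foldl_eq _ _ min _ _ ⟨fun b a₁ a₂ => min_right_comm b a₁ a₂⟩ hperm 1001
            _ = min 1001 (v - c) := by rw [← getShortest_eq]; exact pvGetShortestSorted v c rest hall
        rw [cutSticks]
        rw [dif_neg hl]
        by_cases hcap : v - c ≤ 1001
        · -- normal round: the true minimum v - c is cut, all copies of v disappear
          have hshv : getShortest l = v - c := by rw [hsh]; exact min_eq_right hcap
          rw [hshv]
          have hstep : (subFromAll (v - c) (deleteOfLength (v - c) l)).Perm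
              ((rest.dropWhile (fun x => x == v)).map (fun x => x - v)) := by
            simp only [subFromAll, deleteOfLength]
            have h1 : (l.filter (fun x => x ≠ (v - c))).Perm
                (((v :: rest).map (fun x => x - c)).filter (fun x => x ≠ (v - c))) :=
              hperm.filter _
            have h2 : ((v :: rest).map (fun x => x - c)).filter (fun x => x ≠ (v - c)) =
                ((rest.dropWhile (fun x => x == v)).map (fun x => x - c)) := by
              rw [List.filter_map]
              have hpred : ((fun x => decide (x ≠ (v - c))) ∘ (fun x => x - c)) =
                  (fun x => decide (x ≠ v)) := by
                funext x
                simp only [Function.comp_apply, ne_eq, decide_eq_decide]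
                omega
              rw [hpred]
              congr 1
              rw [List.filter_cons]
              simp only [ne_eq, not_true_eq_false, decide_false]
              exact pvFilterNeEqDropWhile v rest (List.Pairwise.of_cons hsort) hall
            have h3 := (h2 ▸ h1).map (fun x => x - (v - c))
            rw [List.map_map] at h3
            have h4 : ((fun x => x - (v - c)) ∘ (fun x => x - c)) = (fun x => x - v) := by
              funext x; simp only [Function.comp_apply]; omega
            rw [h4] at h3
            exact h3
          have hs'len : (rest.dropWhile (fun x => x == v)).length ≤ n := by
            have h5 := List.length_dropWhile_le (fun x => x == v) rest
            simp only [List.length_cons] at hn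
            omega
          have hs'sort : (rest.dropWhile (fun x => x == v)).Pairwise (· ≤ ·) :=
            List.Pairwise.sublist (List.dropWhile_sublist _) (List.Pairwise.of_cons hsort)
          have hrec := ihn (match rest.dropWhile (fun x => x == v) with
              | [] => (0:Nat) | w :: _ => (w - v).toNat)
            (rest.dropWhile (fun x => x == v)) _ v hs'len (le_refl _) hs'sort hstep
          rw [hrec]
          rw [altLoop]
          have hk : (max 0 (PySem.Int.floordiv (v - c - 1) 1001)).toNat = 0 := by
            rw [PySem.Int.floordiv_eq_ediv_of_pos (by norm_num)]
            have h6 : (v - c - 1) / 1001 ≤ 0 := by omega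
            rw [max_eq_left h6]
            rfl
          rw [hk]
          simp only [List.replicate_zero, List.nil_append]
          congr 1
          rw [hlen]
          push_cast
          ring
        · -- capped round: shortest is the 1001 sentinel, nothing is deleted
          have hcap' : 1001 < v - c := by omega
          have hshv : getShortest l = 1001 := by rw [hsh]; exact min_eq_left (by omega)
          rw [hshv]
          have hgl : ∀ x ∈ l, (1001:Int) < x := by
            intro x hx
            have hx' := hperm.mem_iff.mp hx
            simp only [List.map_cons, List.mem_cons, List.mem_map] at hx'
            rcases hx' with rfl | ⟨y, hy, rfl⟩
            · omega
            · have := hall y hy; omega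
          have hfe : deleteOfLength 1001 l = l := by
            simp only [deleteOfLength]
            refine List.filter_eq_self.mpr ?_
            intro a ha
            have := hgl a ha
            simp only [ne_eq, decide_eq_true_eq]
            omega
          have hmap : (subFromAll 1001 l).Perm
              ((v :: rest).map (fun x => x - (c + 1001))) := by
            simp only [subFromAll]
            have h7 := hperm.map (fun x => x - 1001)
            rw [List.map_map] at h7
            have h8 : ((fun x => x - 1001) ∘ (fun x => x - c)) = (fun x => x - (c + 1001)) := by
              funext x; simp only [Function.comp_apply]; omega
            rw [h8] at h7
            exact h7
          have hm' : (v - (c + 1001)).toNat < m := by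
            simp only at hm
            omega
          have hrec := ihm ((v - (c + 1001)).toNat) hm' (v :: rest) (subFromAll 1001 l)
            (c + 1001) hn (le_refl _) hsort hmap
          rw [hfe, hrec]
          rw [altLoop, altLoop]
          have h9 : (0:Int) ≤ (v - c - 1) / 1001 := Int.ediv_nonneg (by omega) (by norm_num)
          have h10 : (0:Int) ≤ (v - (c + 1001) - 1) / 1001 := Int.ediv_nonneg (by omega) (by norm_num)
          have harith : (max 0 (PySem.Int.floordiv (v - c - 1) 1001)).toNat =
              (max 0 (PySem.Int.floordiv (v - (c + 1001) - 1) 1001)).toNat + 1 := by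
            rw [PySem.Int.floordiv_eq_ediv_of_pos (by norm_num),
              PySem.Int.floordiv_eq_ediv_of_pos (by norm_num)]
            rw [max_eq_right h9, max_eq_right h10]
            omega
          rw [harith, List.replicate_succ]
          simp only [List.cons_append]
          congr 1
          rw [hlen]
          push_cast
          ring

-- after dropping the copies of v, the new head is within 1001 of v (chain boundary)
theorem pvHeadDropGap : ∀ (rest : List Int) (v : Int),
    (v :: rest).IsChain (fun a b => b - a ≤ 1001) →
    ∀ w, (rest.dropWhile (fun x => x == v)).head? = some w → w - v ≤ 1001 := by
  intro rest
  induction rest with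
  | nil => intro v _ w hw; simp [List.dropWhile] at hw
  | cons x t ih =>
    intro v hch w hw
    rcases List.isChain_cons_cons.mp hch with ⟨hxv, hch'⟩
    by_cases he : x = v
    · subst he
      rw [List.dropWhile_cons] at hw
      simp only [BEq.rfl, if_true] at hw
      exact ih x hch' w hw
    · rw [List.dropWhile_cons] at hw
      simp [he] at hw
      omega

-- the walk equality: when no round is capped (head within 1001 of the cut, all
-- consecutive gaps ≤ 1001), A's characterisation collapses to B's walk
theorem pvAltEqB : ∀ (n : Nat) (s : List Int) (c : Int), s.length ≤ n →
    (∀ v, s.head? = some v → v - c ≤ 1001) →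
    s.IsChain (fun a b => b - a ≤ 1001) →
    altLoop s c = bAltLoop s := by
  intro n
  induction n with
  | zero =>
    intro s c hn _ _
    have hs : s = [] := List.length_eq_zero_iff.mp (Nat.le_zero.mp hn)
    subst hs
    simp [altLoop, bAltLoop]
  | succ n ih =>
    intro s c hn hhead hch
    cases s with
    | nil => simp [altLoop, bAltLoop]
    | cons v rest =>
      rw [altLoop, bAltLoop]
      have hvc : v - c ≤ 1001 := hhead v rfl
      have hk : (max 0 (PySem.Int.floordiv (v - c - 1) 1001)).toNat = 0 := by
        rw [PySem.Int.floordiv_eq_ediv_of_pos (by norm_num)]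
        have h6 : (v - c - 1) / 1001 ≤ 0 := by omega
        rw [max_eq_left h6]
        rfl
      rw [hk]
      simp only [List.replicate_zero, List.nil_append]
      congr 1
      refine ih (rest.dropWhile (fun x => x == v)) v ?_ ?_ ?_
      · have := List.length_dropWhile_le (fun x => x == v) rest
        simp only [List.length_cons] at hn
        omega
      · exact pvHeadDropGap rest v hch
      · exact List.IsChain.suffix hch
          ((List.dropWhile_suffix (fun x => x == v)).trans (List.suffix_cons v rest))

-- a sorted list with no 'successor gap' over 1001 is a ≤-1001 chain
theorem pvChainOfNoGap : ∀ (s : List Int), s.Pairwise (· ≤ ·) →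
    (∀ x ∈ s, (∃ y ∈ s, x < y) → ∃ y ∈ s, x < y ∧ y ≤ x + 1001) →
    s.IsChain (fun a b => b - a ≤ 1001) := by
  intro s
  induction s with
  | nil => intro _ _; exact List.isChain_nil
  | cons a t ih =>
    intro hp hgap
    rcases List.pairwise_cons.mp hp with ⟨hale, hpt⟩
    have htail : t.IsChain (fun a b => b - a ≤ 1001) := by
      refine ih hpt ?_
      intro x hx hex
      obtain ⟨y, hy, hxy⟩ := hex
      obtain ⟨z, hz, hxz, hz1001⟩ := hgap x (by simp [hx]) ⟨y, by simp [hy], hxy⟩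
      refine ⟨z, ?_, hxz, hz1001⟩
      rcases List.mem_cons.mp hz with rfl | h
      · exact absurd hxz (not_lt.mpr (hale x hx))
      · exact h
    cases t with
    | nil => exact List.isChain_singleton a
    | cons b t' =>
      refine List.isChain_cons_cons.mpr ⟨?_, htail⟩
      have hab : a ≤ b := hale b (by simp)
      rcases eq_or_lt_of_le hab with rfl | hlt
      · omega
      · obtain ⟨y, hy, hay, hy1001⟩ := hgap a (by simp) ⟨b, by simp, hlt⟩
        have hyt : y ∈ b :: t' := by
          rcases List.mem_cons.mp hy with rfl | h
          · omega
          · exact h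
        have hby : b ≤ y := by
          rcases List.mem_cons.mp hyt with rfl | h
          · exact le_refl _
          · exact (List.pairwise_cons.mp hpt).1 y h
        omega


-- B's walk is never longer than A's characterisation (each step emits 1 vs k+1)
theorem pvLenLe : ∀ (n : Nat) (s : List Int) (c : Int), s.length ≤ n →
    (bAltLoop s).length ≤ (altLoop s c).length := by
  intro n
  induction n with
  | zero =>
    intro s c hn
    have hs : s = [] := List.length_eq_zero_iff.mp (Nat.le_zero.mp hn)
    subst hs
    simp [altLoop, bAltLoop]
  | succ n ih =>
    intro s c hn
    cases s with
    | nil => simp [altLoop, bAltLoop]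
    | cons v rest =>
      rw [altLoop, bAltLoop]
      simp only [List.length_append, List.length_replicate, List.length_cons]
      have hrec := ih (rest.dropWhile (fun x => x == v)) v
        (by have := List.length_dropWhile_le (fun x => x == v) rest
            simp only [List.length_cons] at hn; omega)
      omega

-- if the chain fails from v onward, it fails at or after the first non-copy of v
theorem pvChainFailStep (v : Int) : ∀ (rest : List Int),
    ¬ (v :: rest).IsChain (fun a b => b - a ≤ 1001) →
    (∃ w, (rest.dropWhile (fun x => x == v)).head? = some w ∧ 1001 < w - v) ∨
      ¬ (rest.dropWhile (fun x => x == v)).IsChain (fun a b => b - a ≤ 1001) := by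
  intro rest
  induction rest generalizing v with
  | nil => intro h; exact absurd (List.isChain_singleton v) h
  | cons x t ih =>
    intro h
    by_cases he : x = v
    · subst he
      have h' : ¬ (x :: t).IsChain (fun a b => b - a ≤ 1001) := by
        intro hc
        exact h (List.isChain_cons_cons.mpr ⟨by omega, hc⟩)
      have := ih x h'
      simpa [List.dropWhile_cons] using this
    · rw [List.dropWhile_cons]
      simp only [show (x == v) = false by simp [he], Bool.false_eq_true, if_false]
      by_cases hrel : x - v ≤ 1001
      · right
        intro hc
        exact h (List.isChain_cons_cons.mpr ⟨hrel, hc⟩)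
      · exact Or.inl ⟨x, rfl, by omega⟩

-- a capped step somewhere makes A's characterisation strictly longer than B's walk
theorem pvLenLt : ∀ (n : Nat) (s : List Int) (c : Int), s.length ≤ n →
    ((∃ v, s.head? = some v ∧ 1001 < v - c) ∨ ¬ s.IsChain (fun a b => b - a ≤ 1001)) →
    (bAltLoop s).length < (altLoop s c).length := by
  intro n
  induction n with
  | zero =>
    intro s c hn hbad
    have hs : s = [] := List.length_eq_zero_iff.mp (Nat.le_zero.mp hn)
    subst hs
    rcases hbad with ⟨v, hv, _⟩ | hch
    · simp at hv
    · exact absurd List.isChain_nil hch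
  | succ n ih =>
    intro s c hn hbad
    cases s with
    | nil =>
      rcases hbad with ⟨v, hv, _⟩ | hch
      · simp at hv
      · exact absurd List.isChain_nil hch
    | cons v rest =>
      have hdlen : (rest.dropWhile (fun x => x == v)).length ≤ n := by
        have := List.length_dropWhile_le (fun x => x == v) rest
        simp only [List.length_cons] at hn; omega
      by_cases hcap : 1001 < v - c
      · -- capped head: k ≥ 1 extra emitted count
        rw [altLoop, bAltLoop]
        simp only [List.length_append, List.length_replicate, List.length_cons]
        have hk : 1 ≤ (max 0 (PySem.Int.floordiv (v - c - 1) 1001)).toNat := by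
          rw [PySem.Int.floordiv_eq_ediv_of_pos (by norm_num)]
          have h1 : (1:Int) ≤ (v - c - 1) / 1001 := by omega
          omega
        have hle := pvLenLe n (rest.dropWhile (fun x => x == v)) v hdlen
        omega
      · -- uncapped head: the failure lies further along the walk
        have hbad' : (∃ w, (rest.dropWhile (fun x => x == v)).head? = some w ∧ 1001 < w - v) ∨
            ¬ (rest.dropWhile (fun x => x == v)).IsChain (fun a b => b - a ≤ 1001) := by
          rcases hbad with ⟨w, hw, hw1001⟩ | hch
          · simp only [List.head?_cons, Option.some.injEq] at hw
            omega
          · exact pvChainFailStep v rest hch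
        have hrec := ih (rest.dropWhile (fun x => x == v)) v hdlen hbad'
        rw [altLoop, bAltLoop]
        simp only [List.length_append, List.length_replicate, List.length_cons]
        omega

-- along a sorted ≤-1001 chain, every element with a strict successor has one within 1001
theorem pvChainGap : ∀ (s : List Int), s.Pairwise (· ≤ ·) →
    s.IsChain (fun a b => b - a ≤ 1001) →
    ∀ x ∈ s, ∀ y ∈ s, x < y → ∃ z ∈ s, x < z ∧ z ≤ x + 1001 := by
  intro s
  induction s with
  | nil => intro _ _ x hx; simp at hx
  | cons a t ih =>
    intro hp hch x hx y hy hxy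
    rcases List.pairwise_cons.mp hp with ⟨hale, hpt⟩
    have hcht : t.IsChain (fun a b => b - a ≤ 1001) := hch.tail
    rcases List.mem_cons.mp hx with rfl | hxt
    · -- x is the head
      have hyt : y ∈ t := by
        rcases List.mem_cons.mp hy with rfl | h
        · omega
        · exact h
      cases t with
      | nil => simp at hyt
      | cons b t' =>
        have hxb : x ≤ b := hale b (by simp)
        have hbx1001 : b - x ≤ 1001 := (List.isChain_cons_cons.mp hch).1
        rcases eq_or_lt_of_le hxb with rfl | hlt
        · -- b = x: recurse inside the tail
          obtain ⟨z, hz, hxz, hz1001⟩ := ih hpt hcht x (by simp) y hyt hxy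
          exact ⟨z, by simp [hz], hxz, hz1001⟩
        · exact ⟨b, by simp, hlt, by omega⟩
    · -- x in the tail, so is y
      have hyt : y ∈ t := by
        rcases List.mem_cons.mp hy with rfl | h
        · exact absurd hxy (not_lt.mpr (hale x hxt))
        · exact h
      obtain ⟨z, hz, hxz, hz1001⟩ := ih hpt hcht x hxt y hyt hxy
      exact ⟨z, by simp [hz], hxz, hz1001⟩

-- ===== VERDICT (by name: the statements are the Claim_ definitions above) =====
theorem cutSticks_spec : Claim_unchanged_cutSticks := by
  unfold Claim_unchanged_cutSticks Spec_cutSticks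
  intro sticks _ hnd
  unfold cutSticks_alt
  unfold D_cutSticks at hnd
  push_neg at hnd
  obtain ⟨hd1, hd2⟩ := hnd
  have hperm : sticks.Perm ((PySem.List.sorted sticks (fun x => x) false).map (fun x => x - 0)) := by
    have h1 : (PySem.List.sorted sticks (fun x => x) false).map (fun x => x - 0) =
        PySem.List.sorted sticks (fun x => x) false := by simp
    rw [h1]
    exact (PySem.List.sorted_perm sticks (fun x => x) false).symm
  have hsort : (PySem.List.sorted sticks (fun x => x) false).Pairwise (· ≤ ·) := by
    simpa using PySem.List.sorted_pairwise sticks (fun x => x)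
  have hmem : ∀ x : Int, x ∈ PySem.List.sorted sticks (fun x => x) false ↔ x ∈ sticks :=
    fun x => PySem.List.mem_sorted sticks (fun x => x) false x
  have hA : cutSticks sticks = altLoop (PySem.List.sorted sticks (fun x => x) false) 0 :=
    pvMain (PySem.List.sorted sticks (fun x => x) false).length
      (match PySem.List.sorted sticks (fun x => x) false with
        | [] => (0:Nat) | v :: _ => (v - 0).toNat)
      (PySem.List.sorted sticks (fun x => x) false) sticks 0 (le_refl _) (le_refl _) hsort hperm
  rw [hA]
  refine pvAltEqB (PySem.List.sorted sticks (fun x => x) false).length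
    (PySem.List.sorted sticks (fun x => x) false) 0 (le_refl _) ?_ ?_
  · -- the sorted head is the minimum; since not every stick exceeds 1001, head ≤ 1001
    intro v hv
    have hvmem : v ∈ sticks := (hmem v).mp (List.mem_of_mem_head? hv)
    have hne : sticks ≠ [] := by intro h; subst h; simp at hvmem
    obtain ⟨y, hy, hy1001⟩ := hd1 hne
    have hvy : v ≤ y := by
      have hy' := (hmem y).mpr hy
      cases hcase : PySem.List.sorted sticks (fun x => x) false with
      | nil => rw [hcase] at hv; simp at hv
      | cons a t =>
        rw [hcase] at hv hy'
        have hav : a = v := by simpa using hv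
        subst hav
        rcases List.mem_cons.mp hy' with rfl | h
        · exact le_refl _
        · exact ((List.pairwise_cons.mp (hcase ▸ hsort)).1) y h
    omega
  · refine pvChainOfNoGap _ hsort ?_
    intro x hx hex
    obtain ⟨y, hy, hxy⟩ := hex
    have hx' := (hmem x).mp hx
    have hy' := (hmem y).mp hy
    obtain ⟨z, hz, hxz, hz1001⟩ := hd2 x hx' ⟨y, hy', hxy⟩
    exact ⟨z, (hmem z).mpr hz, hxz, by omega⟩

theorem cutSticks_changed : Claim_changed_cutSticks := by
  unfold Claim_changed_cutSticks
  refine ⟨by decide, by decide, ?_, ?_, by decide⟩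
  · show cutSticks [1002] = ([1, 1] : List Int)
    rw [cutSticks]
    norm_num [getShortest, deleteOfLength, subFromAll]
    rw [cutSticks]
    norm_num [getShortest, deleteOfLength, subFromAll]
    rw [cutSticks]
    simp
  · show cutSticks_alt [1002] = ([1] : List Int)
    have hs : PySem.List.sorted ([1002] : List Int) (fun x => x) false = [1002] := by decide
    rw [cutSticks_alt, hs, bAltLoop]
    norm_num
    rw [bAltLoop]

theorem cutSticks_tight : Claim_exact_cutSticks := by
  unfold Claim_exact_cutSticks
  intro sticks _ hd heq
  have hsort : (PySem.List.sorted sticks (fun x => x) false).Pairwise (· ≤ ·) := by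
    simpa using PySem.List.sorted_pairwise sticks (fun x => x)
  have hmem : ∀ x : Int, x ∈ PySem.List.sorted sticks (fun x => x) false ↔ x ∈ sticks :=
    fun x => PySem.List.mem_sorted sticks (fun x => x) false x
  have hperm : sticks.Perm ((PySem.List.sorted sticks (fun x => x) false).map (fun x => x - 0)) := by
    have h1 : (PySem.List.sorted sticks (fun x => x) false).map (fun x => x - 0) =
        PySem.List.sorted sticks (fun x => x) false := by simp
    rw [h1]
    exact (PySem.List.sorted_perm sticks (fun x => x) false).symm
  have hA : cutSticks sticks = altLoop (PySem.List.sorted sticks (fun x => x) false) 0 :=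
    pvMain (PySem.List.sorted sticks (fun x => x) false).length
      (match PySem.List.sorted sticks (fun x => x) false with
        | [] => (0:Nat) | v :: _ => (v - 0).toNat)
      (PySem.List.sorted sticks (fun x => x) false) sticks 0 (le_refl _) (le_refl _) hsort hperm
  have hbad : (∃ v, (PySem.List.sorted sticks (fun x => x) false).head? = some v ∧ 1001 < v - 0) ∨
      ¬ (PySem.List.sorted sticks (fun x => x) false).IsChain (fun a b => b - a ≤ 1001) := by
    unfold D_cutSticks at hd
    rcases hd with ⟨hne, hall⟩ | ⟨x, hx, ⟨y, hy, hxy⟩, hgap⟩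
    · left
      cases hcase : PySem.List.sorted sticks (fun x => x) false with
      | nil =>
        exfalso
        have hlen := (PySem.List.sorted_perm sticks (fun x => x) false).length_eq
        rw [hcase] at hlen
        exact hne (List.length_eq_zero_iff.mp hlen.symm)
      | cons a t =>
        have ha : a ∈ sticks := (hmem a).mp (by simp [hcase])
        exact ⟨a, rfl, by have := hall a ha; omega⟩
    · right
      intro hch
      obtain ⟨z, hz, hxz, hz1001⟩ := pvChainGap _ hsort hch x ((hmem x).mpr hx) y ((hmem y).mpr hy) hxy
      have := hgap z ((hmem z).mp hz) hxz
      omega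
  have hlt := pvLenLt (PySem.List.sorted sticks (fun x => x) false).length
    (PySem.List.sorted sticks (fun x => x) false) 0 (le_refl _) hbad
  rw [hA] at heq
  rw [heq] at hlt
  unfold cutSticks_alt at hlt
  omega
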